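-- pv_equiv track=rewrite | github.com/kmgowda/ds-programs-python | src/letters-numbers.py | get_large_array
-- ===== SOURCE A (Python) =====
-- def get_large_array(delta):
--     hash={}
--     max = 0
--     ms=0
--     me =0
--     for i in range(len(delta)):
--         if delta[i] in hash:
--             k = hash.get(delta[i])
--             d = i-k
--             if d > max:
--                max = d
--                ms = k
--                me = i
--         else:
--             hash.update({delta[i]:i})
--     return ms,me
-- ===== SOURCE B (Python) =====
-- def get_large_array(delta):
--     span = {}
--     for i, v in enumerate(delta):
--         if v in span:
--             span[v] = (span[v][0], i)
--         else:
--             span[v] = (i, i)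
--     best = 0
--     ms = me = 0
--     for first, last in span.values():
--         d = last - first
--         if d > best or (d == best and last < me):
--             best, ms, me = d, first, last
--     return ms, me
-- ===== Notes on version B (the rewrite author's own statement) =====
-- stated objective: alternative
-- what changed: A interleaves the best-distance selection with building a first-occurrence dict in one indexed loop; B decomposes into two phases: one enumerate pass aggregating each value's (first,last) index span into a dict, then a separate scan over the spans picking the largest last-first (ties to the smaller last index).
import Mathlib
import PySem

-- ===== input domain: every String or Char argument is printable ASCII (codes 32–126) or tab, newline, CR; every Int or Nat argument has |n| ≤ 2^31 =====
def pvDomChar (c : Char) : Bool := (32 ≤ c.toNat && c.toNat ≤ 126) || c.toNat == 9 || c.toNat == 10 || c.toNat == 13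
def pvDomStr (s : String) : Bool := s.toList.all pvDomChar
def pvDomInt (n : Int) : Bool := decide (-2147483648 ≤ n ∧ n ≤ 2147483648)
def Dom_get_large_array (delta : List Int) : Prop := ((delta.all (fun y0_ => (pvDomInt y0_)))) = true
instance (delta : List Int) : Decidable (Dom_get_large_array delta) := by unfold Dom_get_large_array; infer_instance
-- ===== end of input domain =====

-- A interleaves best-distance selection with building a first-occurrence dict in one indexed
-- loop; B is a two-phase decomposition: aggregate each value's (first,last) span, then scan
-- the spans for the best one (objective: alternative decomposition, same cost).

-- ===== PORT A =====
-- loop body of A: state (hash, max, ms, me); `delta[i] in hash` + `hash.get(delta[i])` is one lookup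
def aStep (delta : List Int) (st : PySem.Dict Int Int × Int × Int × Int) (i : Int) :
    PySem.Dict Int Int × Int × Int × Int :=
  match PySem.List.pyGet? delta i with
  | none => st        -- unreachable: i ∈ range(len(delta)) is always in range
  | some v =>
    match st.1.get? v with
    | some k =>        -- delta[i] in hash: k = hash.get(delta[i]); d = i - k
      if i - k > st.2.1 then (st.1, i - k, k, i) else st
    | none => (st.1.insert v i, st.2.1, st.2.2.1, st.2.2.2)   -- hash.update({delta[i]: i})

def get_large_array (delta : List Int) : Int × Int :=
  let st := (PySem.List.pyRange 0 (delta.length : Int) 1).foldl (aStep delta)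
    (PySem.Dict.empty, 0, 0, 0)
  (st.2.2.1, st.2.2.2)

-- ===== PORT B =====
-- phase-1 body: span[v] = (span[v][0], i) if v in span else (i, i)
def bStep (s : PySem.Dict Int (Int × Int)) (p : Int × Int) : PySem.Dict Int (Int × Int) :=
  match s.get? p.2 with
  | some fl => s.insert p.2 (fl.1, p.1)
  | none => s.insert p.2 (p.1, p.1)

-- phase-2 body: d = last - first; update best on d > best, or on a tie with a smaller last
def sel2 (st : Int × Int × Int) (fl : Int × Int) : Int × Int × Int :=
  if fl.2 - fl.1 > st.1 ∨ (fl.2 - fl.1 = st.1 ∧ fl.2 < st.2.2) then (fl.2 - fl.1, fl.1, fl.2) else st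

def get_large_array_alt (delta : List Int) : Int × Int :=
  let span := (PySem.List.enumerate delta 0).foldl bStep PySem.Dict.empty
  let sel := span.values.foldl sel2 (0, 0, 0)
  (sel.2.1, sel.2.2)

-- ===== PRECONDITION & SPEC =====
def Spec_get_large_array (delta : List Int) (out : Int × Int) : Prop := out = get_large_array_alt delta
instance (delta : List Int) (out : Int × Int) : Decidable (Spec_get_large_array delta out) := by unfold Spec_get_large_array; infer_instance

-- ===== CLAIM (what is proved, stated in full; the proofs are below) =====
def Claim_equal_get_large_array : Prop := ∀ (delta : List Int), Dom_get_large_array delta → Spec_get_large_array delta (get_large_array delta)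

-- ===== LEMMAS AND PROOFS =====

-- A's loop body re-keyed on an (index, value) pair (used only by the proofs)
def aStepE (st : PySem.Dict Int Int × Int × Int × Int) (p : Int × Int) :
    PySem.Dict Int Int × Int × Int × Int :=
  match st.1.get? p.2 with
  | some k => if p.1 - k > st.2.1 then (st.1, p.1 - k, k, p.1) else st
  | none => (st.1.insert p.2 p.1, st.2.1, st.2.2.1, st.2.2.2)

def afold (xs : List Int) : PySem.Dict Int Int × Int × Int × Int :=
  (PySem.List.enumerate xs 0).foldl aStepE (PySem.Dict.empty, 0, 0, 0)

def sfold (xs : List Int) : PySem.Dict Int (Int × Int) :=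
  (PySem.List.enumerate xs 0).foldl bStep PySem.Dict.empty

-- "good n st": any selection state reached scanning spans whose last index is ≤ n
def goodSt (n : Int) (st : Int × Int × Int) : Prop := 0 ≤ st.1 ∧ st.2.2 ≤ n

theorem goodSt_sel2 {n : Int} {st : Int × Int × Int} {e : Int × Int}
    (h : goodSt n st) (he : 0 ≤ e.1 ∧ e.1 ≤ e.2 ∧ e.2 ≤ n) : goodSt n (sel2 st e) := by
  unfold goodSt sel2 at *; split_ifs <;> simp_all <;> omega

theorem goodSt_foldl {n : Int} {E : List (Int × Int)} {st : Int × Int × Int}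
    (h : goodSt n st) (he : ∀ e ∈ E, 0 ≤ e.1 ∧ e.1 ≤ e.2 ∧ e.2 ≤ n) :
    goodSt n (E.foldl sel2 st) := by
  induction E generalizing st with
  | nil => exact h
  | cons e E ih =>
    exact ih (goodSt_sel2 h (he e (by simp))) (fun x hx => he x (by simp [hx]))

theorem sel2_diag {n : Int} {st : Int × Int × Int} (h : goodSt n st) : sel2 st (n, n) = st := by
  unfold goodSt at h; unfold sel2; split_ifs with hc
  · exfalso; rcases hc with hc | hc <;> simp_all <;> omega
  · rfl

theorem sel2_mono (st : Int × Int × Int) (e : Int × Int) : st.1 ≤ (sel2 st e).1 := by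
  unfold sel2; split_ifs <;> simp_all <;> omega

-- relation between the span fold with v's last bumped to n and the fold over the old spans
def Rrel (n f : Int) (a b : Int × Int × Int) : Prop :=
  (a = b ∧ n - f ≤ a.1) ∨ (a = (n - f, f, n) ∧ b.1 < n - f)

theorem Rrel_step {n f : Int} {a b : Int × Int × Int} {e : Int × Int}
    (hR : Rrel n f a b) (he : 0 ≤ e.1 ∧ e.1 ≤ e.2 ∧ e.2 < n) :
    Rrel n f (sel2 a e) (sel2 b e) := by
  rcases hR with ⟨rfl, hle⟩ | ⟨rfl, hlt⟩
  · exact Or.inl ⟨rfl, le_trans hle (sel2_mono _ _)⟩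
  · by_cases hd : n - f ≤ e.2 - e.1
    · left
      constructor
      · unfold sel2; split_ifs with h1 h2 <;> simp_all <;> omega
      · have : (sel2 (n - f, f, n) e) = (e.2 - e.1, e.1, e.2) := by
          unfold sel2; split_ifs with h1 <;> simp_all <;> omega
        rw [this]; simpa using hd
    · right
      constructor
      · unfold sel2; split_ifs with h1 <;> simp_all <;> omega
      · have := sel2_mono b e
        unfold sel2 at *; split_ifs at * <;> simp_all <;> omega

theorem Rrel_foldl {n f : Int} {E : List (Int × Int)} {a b : Int × Int × Int}
    (hR : Rrel n f a b) (he : ∀ e ∈ E, 0 ≤ e.1 ∧ e.1 ≤ e.2 ∧ e.2 < n) :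
    Rrel n f (E.foldl sel2 a) (E.foldl sel2 b) := by
  induction E generalizing a b with
  | nil => exact hR
  | cons e E ih =>
    exact ih (Rrel_step hR (he e (by simp))) (fun x hx => he x (by simp [hx]))

theorem Rrel_init {n f l : Int} {s : Int × Int × Int}
    (hs : goodSt n s) (hfl : 0 ≤ f ∧ f ≤ l ∧ l < n) :
    Rrel n f (sel2 s (f, n)) (sel2 s (f, l)) := by
  obtain ⟨h0, hme⟩ := hs
  by_cases hc : n - f > s.1
  · right
    constructor
    · unfold sel2; split_ifs with h1 <;> simp_all <;> omega
    · unfold sel2; split_ifs with h1 <;> simp_all <;> omega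
  · left
    have ha : sel2 s (f, n) = s := by
      unfold sel2; split_ifs with h1 <;> simp_all <;> omega
    have hb : sel2 s (f, l) = s := by
      unfold sel2; split_ifs with h1 <;> simp_all <;> omega
    rw [ha, hb]; exact ⟨rfl, by omega⟩

-- the combined invariant carried through the joint snoc induction over the input
def InvAB (xs : List Int) : Prop :=
  (∀ w, (afold xs).1.get? w = ((sfold xs).get? w).map Prod.fst)
  ∧ (sfold xs).keys.Nodup
  ∧ (∀ p ∈ (sfold xs).items, 0 ≤ p.2.1 ∧ p.2.1 ≤ p.2.2 ∧ p.2.2 < (xs.length : Int))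
  ∧ (afold xs).2 = ((sfold xs).items.map Prod.snd).foldl sel2 (0, 0, 0)

theorem afold_snoc (xs : List Int) (v : Int) :
    afold (xs ++ [v]) = aStepE (afold xs) ((xs.length : Int), v) := by
  simp [afold, PySem.List.enumerate_append, PySem.List.enumerate_cons,
    PySem.List.enumerate_nil, List.foldl_append, List.length_cons]

theorem sfold_snoc (xs : List Int) (v : Int) :
    sfold (xs ++ [v]) = bStep (sfold xs) ((xs.length : Int), v) := by
  simp [sfold, PySem.List.enumerate_append, PySem.List.enumerate_cons,
    PySem.List.enumerate_nil, List.foldl_append, List.length_cons]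

theorem items_empty_int : (PySem.Dict.empty : PySem.Dict Int (Int × Int)).items = [] := rfl

theorem inv_holds (xs : List Int) : InvAB xs := by
  induction xs using List.reverseRecOn with
  | nil =>
    refine ⟨fun w => ?_, ?_, fun p hp => ?_, ?_⟩ <;>
      simp [afold, sfold, PySem.List.enumerate_nil, PySem.Dict.get?_empty,
        PySem.Dict.keys_empty, items_empty_int] at *
  | append_singleton xs v ih =>
    obtain ⟨h1, h2, h3, h4⟩ := ih
    have hn0 : (0 : Int) ≤ (xs.length : Int) := by positivity
    have hlen : (((xs ++ [v]).length : Nat) : Int) = (xs.length : Int) + 1 := by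
      push_cast [List.length_append, List.length_cons, List.length_nil]; omega
    rw [InvAB, afold_snoc, sfold_snoc, hlen]
    cases hget : (sfold xs).get? v with
    | none =>
      have hget1 : (afold xs).1.get? v = none := by rw [h1, hget]; rfl
      have hcon : (sfold xs).contains v = false := by
        rw [PySem.Dict.contains_eq_isSome_get?, hget]; rfl
      have hstep : aStepE (afold xs) ((xs.length : Int), v)
          = ((afold xs).1.insert v (xs.length : Int), (afold xs).2) := by
        simp only [aStepE, hget1]
      have hbstep : bStep (sfold xs) ((xs.length : Int), v)
          = (sfold xs).insert v ((xs.length : Int), (xs.length : Int)) := by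
        simp only [bStep, hget]
      have hitems : (bStep (sfold xs) ((xs.length : Int), v)).items
          = (sfold xs).items ++ [(v, ((xs.length : Int), (xs.length : Int)))] := by
        rw [hbstep]
        exact PySem.Dict.items_insert_of_not_contains _ _ hcon
      refine ⟨fun w => ?_, ?_, fun p hp => ?_, ?_⟩
      · rw [hstep, hbstep]
        simp only [PySem.Dict.get?_insert]
        split_ifs with hw
        · rfl
        · exact h1 w
      · rw [hbstep]; exact PySem.Dict.nodup_keys_insert _ _ _ h2
      · rw [hitems] at hp
        rcases List.mem_append.mp hp with hp | hp
        · have := h3 p hp; omega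
        · simp at hp; subst hp
          refine ⟨hn0, le_refl _, ?_⟩
          show (xs.length : Int) < (xs.length : Int) + 1
          omega
      · rw [hstep, hitems]
        simp only [List.map_append, List.foldl_append, List.map_cons, List.map_nil,
          List.foldl_cons, List.foldl_nil]
        have hgood : goodSt (xs.length : Int)
            (((sfold xs).items.map Prod.snd).foldl sel2 (0, 0, 0)) := by
          apply goodSt_foldl ⟨le_refl 0, hn0⟩
          intro e he
          obtain ⟨p, hp, rfl⟩ := List.mem_map.mp he
          have := h3 p hp; exact ⟨this.1, this.2.1, le_of_lt this.2.2⟩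
        rw [sel2_diag hgood, h4]
    | some fl =>
      have hget1 : (afold xs).1.get? v = some fl.1 := by rw [h1, hget]; rfl
      have hcon : (sfold xs).contains v = true := by
        rw [PySem.Dict.contains_eq_isSome_get?, hget]; rfl
      have hstep1 : (aStepE (afold xs) ((xs.length : Int), v)).1 = (afold xs).1 := by
        simp only [aStepE, hget1]; split_ifs <;> rfl
      have hstep2 : (aStepE (afold xs) ((xs.length : Int), v)).2
          = if (xs.length : Int) - fl.1 > (afold xs).2.1
            then ((xs.length : Int) - fl.1, fl.1, (xs.length : Int)) else (afold xs).2 := by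
        simp only [aStepE, hget1]; split_ifs <;> rfl
      have hbstep : bStep (sfold xs) ((xs.length : Int), v)
          = (sfold xs).insert v (fl.1, (xs.length : Int)) := by
        simp only [bStep, hget]
      have hmem : (v, fl) ∈ (sfold xs).items :=
        PySem.Dict.mem_items_of_get?_eq_some _ hget
      obtain ⟨E₁, E₂, hdec⟩ := List.append_of_mem hmem
      have hnd : ((E₁ ++ (v, fl) :: E₂).map (fun p => p.1)).Nodup := by
        have h2' := h2
        simp only [PySem.Dict.keys, hdec] at h2'
        exact h2'
      rw [List.map_append, List.map_cons] at hnd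
      have hne1 : ∀ p ∈ E₁, p.1 ≠ v := by
        intro p hp hpv
        exact (List.disjoint_of_nodup_append hnd)
          (List.mem_map.mpr ⟨p, hp, hpv⟩) (by simp)
      have hne2 : ∀ p ∈ E₂, p.1 ≠ v := by
        intro p hp hpv
        have hc := (List.nodup_append.mp hnd).2.1
        exact (List.nodup_cons.mp hc).1 (List.mem_map.mpr ⟨p, hp, hpv⟩)
      have hitems : (bStep (sfold xs) ((xs.length : Int), v)).items
          = E₁ ++ (v, (fl.1, (xs.length : Int))) :: E₂ := by
        rw [hbstep, PySem.Dict.items_insert_of_contains _ _ hcon, hdec]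
        rw [List.map_append, List.map_cons]
        congr 1
        · calc List.map (fun p => if (p.1 == v) = true then (v, (fl.1, (xs.length : Int))) else p) E₁
              = List.map id E₁ := List.map_congr_left (fun p hp => by simp [hne1 p hp])
            _ = E₁ := List.map_id E₁
        · congr 1
          · simp
          · calc List.map (fun p => if (p.1 == v) = true then (v, (fl.1, (xs.length : Int))) else p) E₂
                = List.map id E₂ := List.map_congr_left (fun p hp => by simp [hne2 p hp])
              _ = E₂ := List.map_id E₂
      have hflb : 0 ≤ fl.1 ∧ fl.1 ≤ fl.2 ∧ fl.2 < (xs.length : Int) := h3 (v, fl) hmem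
      refine ⟨fun w => ?_, ?_, fun p hp => ?_, ?_⟩
      · rw [hstep1, hbstep]
        simp only [PySem.Dict.get?_insert]
        split_ifs with hw
        · subst hw; rw [hget1]; rfl
        · exact h1 w
      · rw [hbstep]; exact PySem.Dict.nodup_keys_insert _ _ _ h2
      · rw [hitems] at hp
        rcases List.mem_append.mp hp with hp | hp
        · have := h3 p (by rw [hdec]; exact List.mem_append.mpr (Or.inl hp)); omega
        · rcases List.mem_cons.mp hp with hp | hp
          · subst hp; simp; omega
          · have := h3 p (by rw [hdec]; simp [hp]); omega
      · have hb1 : ∀ e ∈ E₁.map Prod.snd, 0 ≤ e.1 ∧ e.1 ≤ e.2 ∧ e.2 ≤ (xs.length : Int) := by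
          intro e he
          obtain ⟨p, hp, rfl⟩ := List.mem_map.mp he
          have := h3 p (by rw [hdec]; exact List.mem_append.mpr (Or.inl hp))
          exact ⟨this.1, this.2.1, le_of_lt this.2.2⟩
        have hb2 : ∀ e ∈ E₂.map Prod.snd, 0 ≤ e.1 ∧ e.1 ≤ e.2 ∧ e.2 < (xs.length : Int) := by
          intro e he
          obtain ⟨p, hp, rfl⟩ := List.mem_map.mp he
          exact h3 p (by rw [hdec]; simp [hp])
        have hgood : goodSt (xs.length : Int)
            ((E₁.map Prod.snd).foldl sel2 (0, 0, 0)) := goodSt_foldl ⟨le_refl 0, hn0⟩ hb1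
        have hR0 : Rrel ((xs.length : Int)) fl.1
            (sel2 ((E₁.map Prod.snd).foldl sel2 (0, 0, 0)) (fl.1, (xs.length : Int)))
            (sel2 ((E₁.map Prod.snd).foldl sel2 (0, 0, 0)) fl) :=
          Rrel_init (l := fl.2) hgood hflb
        have hR := Rrel_foldl hR0 hb2
        have hold : (afold xs).2
            = (E₂.map Prod.snd).foldl sel2 (sel2 ((E₁.map Prod.snd).foldl sel2 (0, 0, 0)) fl) := by
          rw [h4, hdec]
          simp [List.foldl_append, List.foldl_cons]
        rw [hstep2, hitems]
        simp only [List.map_append, List.map_cons, List.foldl_append, List.foldl_cons]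
        rcases hR with ⟨heq, hle⟩ | ⟨ha, hb⟩
        · have hcond : ¬ ((xs.length : Int) - fl.1 > (afold xs).2.1) := by
            rw [hold, ← heq]; omega
          rw [if_neg hcond, hold, ← heq]
        · have hcond : (xs.length : Int) - fl.1 > (afold xs).2.1 := by
            rw [hold]; omega
          rw [if_pos hcond, ha]

-- A's pyRange/pyGet? loop is the fold of aStepE over enumerate
theorem a_loop_enumerate (delta : List Int) :
    (PySem.List.pyRange 0 (delta.length : Int) 1).foldl (aStep delta)
      (PySem.Dict.empty, 0, 0, 0) = afold delta := by
  unfold afold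
  rw [PySem.List.enumerate_eq_map_pyRange (d := 0), List.foldl_map]
  simp only [PySem.List.len_eq]
  apply PySem.List.foldl_congr_mem
  intro st j hj
  rw [PySem.List.mem_pyRange_one] at hj
  have hjg : PySem.List.pyGet? delta j = some (PySem.List.pyGetD delta j 0) := by
    obtain ⟨k, rfl⟩ : ∃ k : Nat, (k : Int) = j := ⟨j.toNat, by omega⟩
    have hk : k < delta.length := by exact_mod_cast hj.2
    rw [PySem.List.pyGet?_natCast, PySem.List.pyGetD_natCast]
    simp [List.getElem?_eq_getElem hk, List.getD_eq_getElem?_getD]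
  simp only [aStep, aStepE, hjg]

-- ===== VERDICT (by name: the statement is the Claim_ definition above) =====
theorem get_large_array_spec : Claim_equal_get_large_array := by
  intro delta _
  unfold Spec_get_large_array get_large_array get_large_array_alt
  have h4 := (inv_holds delta).2.2.2
  simp only [sfold] at h4
  rw [a_loop_enumerate delta]
  simp only [PySem.Dict.values]
  rw [← h4]
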